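-- pv_equiv track=rewrite | github.com/imacc19/YACAVerano2024T1 | codigo_base/.ipynb_checkpoints/chema-checkpoint.py | fa_grouped
-- ===== SOURCE A (Python) =====
-- def fa_grouped(datos, lim_inf, lim_sup):
--
--     fa = [0] * len(lim_inf)
--     clases = [0] * len(lim_inf)
--
--     for i in range(len(lim_inf)):
--         clases[i] = i + 1
--
--     for elemento in datos:
--         for j in range(0, len(lim_inf)):
--             if j == 0:
--             # if j == len(lim_inf)-1:
--                 if lim_inf[j] <= elemento <= lim_sup[j]:
--                     fa[j] += 1
--                     break
--             else:
--                 if lim_inf[j] < elemento <= lim_sup[j]: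
--                 #if lim_inf[j] <= elemento < lim_sup[j]:
--                     fa[j] += 1
--                     break
--     return fa, clases
-- ===== SOURCE B (Python) =====
-- def fa_grouped(datos, lim_inf, lim_sup):
--     # Bins-outer pass over a shrinking pool: a bin's count is the number of pool
--     # elements it absorbs; absorbed elements leave the pool, so later bins never
--     # see them (= A's first-match break).
--     fa = []
--     pool = datos
--     for j in range(len(lim_inf)):
--         lo, hi = lim_inf[j], lim_sup[j]
--         if j == 0:
--             rest = [x for x in pool if not lo <= x <= hi]
--         else:
--             rest = [x for x in pool if not lo < x <= hi]
--         fa.append(len(pool) - len(rest))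
--         pool = rest
--     return fa, list(range(1, len(lim_inf) + 1))
-- ===== Notes on version B (the rewrite author's own statement) =====
-- stated objective: alternative
-- what changed: B inverts the loop nesting: instead of scanning the bins for every element with a break, it walks the bins once over a shrinking pool of still-unassigned elements, taking a bin's count as the number of pool elements it absorbs and keeping only the rest, which reproduces A's first-match semantics without a per-element inner scan.
-- outside the precondition, e.g. on fa_grouped([1], [0, 5], [3]): A returns ([1, 0], [1, 2]), B raises IndexError
import Mathlib
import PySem

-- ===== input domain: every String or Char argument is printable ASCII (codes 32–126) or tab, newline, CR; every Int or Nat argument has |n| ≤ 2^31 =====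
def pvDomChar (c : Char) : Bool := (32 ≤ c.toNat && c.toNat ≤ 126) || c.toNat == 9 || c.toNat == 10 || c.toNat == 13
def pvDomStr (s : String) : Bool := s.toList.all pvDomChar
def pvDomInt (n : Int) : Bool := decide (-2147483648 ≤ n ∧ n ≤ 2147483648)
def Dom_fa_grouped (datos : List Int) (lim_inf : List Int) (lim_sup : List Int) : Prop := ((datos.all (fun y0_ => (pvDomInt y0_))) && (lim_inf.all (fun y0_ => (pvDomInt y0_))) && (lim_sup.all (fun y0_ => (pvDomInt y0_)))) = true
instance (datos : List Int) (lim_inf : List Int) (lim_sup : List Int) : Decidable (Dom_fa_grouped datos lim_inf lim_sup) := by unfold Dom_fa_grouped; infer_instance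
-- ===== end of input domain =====

-- B inverts the loop nesting of A (elements outer, bins inner with break) into a single
-- walk over the bins with a shrinking pool of still-unassigned elements; same return value.

-- ===== PORT A =====
-- inner 'for j in range(len(lim_inf)): … break' of A, for one element x
def faScanA (lim_inf lim_sup : List Int) (x : Int) (fa : List Int) (j : Nat) : List Int :=
  if h : j < lim_inf.length then
    if j = 0 then
      if lim_inf.getD j 0 ≤ x ∧ x ≤ lim_sup.getD j 0 then
        fa.set j (fa.getD j 0 + 1)
      else faScanA lim_inf lim_sup x fa (j + 1)
    else
      if lim_inf.getD j 0 < x ∧ x ≤ lim_sup.getD j 0 then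
        fa.set j (fa.getD j 0 + 1)
      else faScanA lim_inf lim_sup x fa (j + 1)
  else fa
termination_by lim_inf.length - j

def fa_grouped (datos : List Int) (lim_inf : List Int) (lim_sup : List Int) : List Int × List Int :=
  let fa0 : List Int := List.replicate lim_inf.length 0
  let clases : List Int := (List.range lim_inf.length).map (fun i => ((i + 1 : Nat) : Int))
  (datos.foldl (fun fa x => faScanA lim_inf lim_sup x fa 0) fa0, clases)

-- ===== PORT B =====
-- bins-outer loop of B: a bin's count = pool elements absorbed; recurse on the rest
def faPoolB (lim_inf lim_sup : List Int) (pool : List Int) (j : Nat) : List Int :=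
  if h : j < lim_inf.length then
    let lo := lim_inf.getD j 0
    let hi := lim_sup.getD j 0
    let rest := if j = 0 then pool.filter (fun x => !(decide (lo ≤ x) && decide (x ≤ hi)))
                else pool.filter (fun x => !(decide (lo < x) && decide (x ≤ hi)))
    ((pool.length : Int) - (rest.length : Int)) :: faPoolB lim_inf lim_sup rest (j + 1)
  else []
termination_by lim_inf.length - j

def fa_grouped_alt (datos : List Int) (lim_inf : List Int) (lim_sup : List Int) : List Int × List Int :=
  (faPoolB lim_inf lim_sup datos 0, PySem.List.pyRange 1 ((lim_inf.length : Int) + 1) 1)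

-- ===== PRECONDITION & SPEC =====
-- Pre_ excludes inputs where lim_sup is shorter than lim_inf: there A raises IndexError as soon
-- as some element reaches a bin past lim_sup's end (and only returns by accident when the data
-- happens to stay in the early bins), while B always indexes every bin and raises.
def Pre_fa_grouped (datos : List Int) (lim_inf : List Int) (lim_sup : List Int) : Prop :=
  lim_inf.length ≤ lim_sup.length
instance (datos : List Int) (lim_inf : List Int) (lim_sup : List Int) : Decidable (Pre_fa_grouped datos lim_inf lim_sup) := by unfold Pre_fa_grouped; infer_instance

def pvWitness_fa_grouped : List Int × List Int × List Int := ([2, 7, 4, 11], [0, 5], [5, 10])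

def Spec_fa_grouped (datos : List Int) (lim_inf : List Int) (lim_sup : List Int) (out : List Int × List Int) : Prop := out = fa_grouped_alt datos lim_inf lim_sup
instance (datos : List Int) (lim_inf : List Int) (lim_sup : List Int) (out : List Int × List Int) : Decidable (Spec_fa_grouped datos lim_inf lim_sup out) := by unfold Spec_fa_grouped; infer_instance

-- ===== CLAIM (what is proved, stated in full; the proofs are below) =====
def Claim_equal_fa_grouped : Prop := ∀ (datos : List Int) (lim_inf : List Int) (lim_sup : List Int), Dom_fa_grouped datos lim_inf lim_sup → Pre_fa_grouped datos lim_inf lim_sup → Spec_fa_grouped datos lim_inf lim_sup (fa_grouped datos lim_inf lim_sup)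

-- ===== LEMMAS AND PROOFS =====

-- the bin-j membership test both programs use
def faPred (lim_inf lim_sup : List Int) (j : Nat) (x : Int) : Bool :=
  if j = 0 then decide (lim_inf.getD j 0 ≤ x ∧ x ≤ lim_sup.getD j 0)
  else decide (lim_inf.getD j 0 < x ∧ x ≤ lim_sup.getD j 0)

-- index of the first bin ≥ j that x falls into (the bin A's break selects)
def faFirst (lim_inf lim_sup : List Int) (j : Nat) (x : Int) : Option Nat :=
  if h : j < lim_inf.length then
    if faPred lim_inf lim_sup j x then some j else faFirst lim_inf lim_sup (j + 1) x
  else none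
termination_by lim_inf.length - j

theorem faFirst_pos (lim_inf lim_sup : List Int) (j : Nat) (x : Int)
    (hj : j < lim_inf.length) (hp : faPred lim_inf lim_sup j x = true) :
    faFirst lim_inf lim_sup j x = some j := by
  unfold faFirst; simp [hj, hp]

theorem faFirst_neg (lim_inf lim_sup : List Int) (j : Nat) (x : Int)
    (hp : faPred lim_inf lim_sup j x = false) :
    faFirst lim_inf lim_sup j x = faFirst lim_inf lim_sup (j + 1) x := by
  by_cases hj : j < lim_inf.length
  · rw [faFirst]; simp [hj, hp]
  · rw [faFirst, dif_neg hj, faFirst, dif_neg (by omega : ¬ j + 1 < lim_inf.length)]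

theorem faFirst_none (lim_inf lim_sup : List Int) (j : Nat) (x : Int)
    (hj : ¬ j < lim_inf.length) : faFirst lim_inf lim_sup j x = none := by
  unfold faFirst; simp [hj]

theorem faFirst_ge (lim_inf lim_sup : List Int) :
    ∀ (n j : Nat) (x : Int) (i : Nat), lim_inf.length ≤ j + n →
      faFirst lim_inf lim_sup j x = some i → j ≤ i ∧ i < lim_inf.length := by
  intro n
  induction n with
  | zero =>
    intro j x i hn h
    rw [faFirst_none lim_inf lim_sup j x (by omega)] at h
    cases h
  | succ n ih =>
    intro j x i hn h
    by_cases hj : j < lim_inf.length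
    · by_cases hp : faPred lim_inf lim_sup j x
      · rw [faFirst_pos lim_inf lim_sup j x hj hp] at h
        cases h; exact ⟨le_refl _, hj⟩
      · rw [faFirst_neg lim_inf lim_sup j x (by simpa using hp)] at h
        have := ih (j + 1) x i (by omega) h
        omega
    · rw [faFirst_none lim_inf lim_sup j x hj] at h
      cases h

-- A's inner break-scan selects exactly the first-match index
theorem faScanA_eq (lim_inf lim_sup : List Int) (x : Int) :
    ∀ (n j : Nat) (fa : List Int), lim_inf.length ≤ j + n →
      faScanA lim_inf lim_sup x fa j =
        match faFirst lim_inf lim_sup j x with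
        | some i => fa.set i (fa.getD i 0 + 1)
        | none => fa := by
  intro n
  induction n with
  | zero =>
    intro j fa hn
    rw [faFirst_none lim_inf lim_sup j x (by omega)]
    unfold faScanA; simp [show ¬ j < lim_inf.length by omega]
  | succ n ih =>
    intro j fa hn
    by_cases hj : j < lim_inf.length
    · unfold faScanA
      rw [dif_pos hj]
      by_cases h0 : j = 0
      · subst h0
        rw [if_pos rfl]
        split_ifs with hc
        · rw [faFirst_pos lim_inf lim_sup 0 x hj (by simp only [faPred]; exact decide_eq_true hc)]
        · rw [faFirst_neg lim_inf lim_sup 0 x (by simp only [faPred]; exact decide_eq_false hc)]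
          exact ih 1 fa (by omega)
      · rw [if_neg h0]
        split_ifs with hc
        · rw [faFirst_pos lim_inf lim_sup j x hj (by simp only [faPred, if_neg h0]; exact decide_eq_true hc)]
        · rw [faFirst_neg lim_inf lim_sup j x (by simp only [faPred, if_neg h0]; exact decide_eq_false hc)]
          exact ih (j + 1) fa (by omega)
    · rw [faFirst_none lim_inf lim_sup j x hj]
      unfold faScanA; simp [hj]

-- characterisation of B's pool recursion by the first-match index
theorem faPoolB_char (lim_inf lim_sup : List Int) :
    ∀ (n j : Nat) (pool : List Int), lim_inf.length ≤ j + n →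
      faPoolB lim_inf lim_sup pool j =
        (List.range (lim_inf.length - j)).map
          (fun i => ((pool.filter (fun x => faFirst lim_inf lim_sup j x == some (j + i))).length : Int)) := by
  intro n
  induction n with
  | zero =>
    intro j pool hn
    rw [show lim_inf.length - j = 0 by omega]
    unfold faPoolB
    simp [show ¬ j < lim_inf.length by omega]
  | succ n ih =>
    intro j pool hn
    by_cases hj : j < lim_inf.length
    · unfold faPoolB
      rw [dif_pos hj]
      have hrest : (if j = 0 then pool.filter (fun x => !(decide (lim_inf.getD j 0 ≤ x) && decide (x ≤ lim_sup.getD j 0)))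
                    else pool.filter (fun x => !(decide (lim_inf.getD j 0 < x) && decide (x ≤ lim_sup.getD j 0))))
                 = pool.filter (fun x => !faPred lim_inf lim_sup j x) := by
        by_cases h0 : j = 0 <;> simp [faPred, h0]
      simp only [hrest]
      rw [show lim_inf.length - j = (lim_inf.length - (j + 1)) + 1 by omega,
          List.range_succ_eq_map, List.map_cons, List.map_map]
      congr 1
      · -- head: bin j's count = pool size minus what survives
        have hsplit := List.length_eq_length_filter_add (l := pool) (faPred lim_inf lim_sup j)
        have hpt : ∀ y ∈ pool, faPred lim_inf lim_sup j y
            = (faFirst lim_inf lim_sup j y == some (j + 0)) := by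
          intro y _
          by_cases hpy : faPred lim_inf lim_sup j y
          · rw [hpy, faFirst_pos lim_inf lim_sup j y hj hpy]; simp
          · have hpy' : faPred lim_inf lim_sup j y = false := by simpa using hpy
            rw [hpy', faFirst_neg lim_inf lim_sup j y hpy']
            symm
            rw [beq_eq_false_iff_ne]
            intro hcon
            have := faFirst_ge lim_inf lim_sup lim_inf.length (j + 1) y (j + 0) (by omega) hcon
            omega
        rw [← List.filter_congr hpt, hsplit]
        push_cast
        ring
      · -- tail: later bins on the shrunk pool
        rw [ih (j + 1) _ (by omega)]
        apply List.map_congr_left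
        intro i _
        rw [List.filter_filter]
        have hpt : ∀ y ∈ pool,
            (faFirst lim_inf lim_sup (j + 1) y == some (j + 1 + i) && !faPred lim_inf lim_sup j y)
              = (faFirst lim_inf lim_sup j y == some (j + Nat.succ i)) := by
          intro y _
          rw [show j + Nat.succ i = j + 1 + i by omega]
          by_cases hpy : faPred lim_inf lim_sup j y
          · rw [hpy, faFirst_pos lim_inf lim_sup j y hj hpy]
            simp only [Bool.not_true, Bool.and_false]
            symm
            rw [beq_eq_false_iff_ne]
            intro hcon
            have : j = j + 1 + i := Option.some.inj hcon
            omega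
          · have hpy' : faPred lim_inf lim_sup j y = false := by simpa using hpy
            rw [hpy', faFirst_neg lim_inf lim_sup j y hpy']
            simp
        exact congrArg _ (congrArg _ (List.filter_congr hpt))
    · rw [show lim_inf.length - j = 0 by omega]
      unfold faPoolB
      simp [hj]

theorem faScanA_length (lim_inf lim_sup : List Int) (x : Int) (fa : List Int) (j : Nat)
    (hn : lim_inf.length ≤ j + lim_inf.length) :
    (faScanA lim_inf lim_sup x fa j).length = fa.length := by
  rw [faScanA_eq lim_inf lim_sup x lim_inf.length j fa hn]
  cases h : faFirst lim_inf lim_sup j x <;> simp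

-- characterisation of A's fold: pointwise add of first-match counts onto the accumulator
theorem faFoldA_char (lim_inf lim_sup : List Int) (datos : List Int) :
    ∀ (fa : List Int), fa.length = lim_inf.length →
    datos.foldl (fun fa x => faScanA lim_inf lim_sup x fa 0) fa =
      (List.range lim_inf.length).map
        (fun i => fa.getD i 0 + ((datos.filter (fun x => faFirst lim_inf lim_sup 0 x == some i)).length : Int)) := by
  induction datos with
  | nil =>
    intro fa hlen
    simp only [List.foldl_nil, List.filter_nil, List.length_nil, Nat.cast_zero, add_zero]
    apply List.ext_getElem (by simpa using hlen)
    intro i h1 h2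
    simp only [List.getElem_map, List.getElem_range]
    rw [List.getD_eq_getElem fa 0 h1]
  | cons x rest ih =>
    intro fa hlen
    simp only [List.foldl_cons]
    rw [ih _ (by rw [faScanA_length _ _ _ _ _ (by omega)]; exact hlen)]
    apply List.map_congr_left
    intro i hi
    simp only [List.mem_range] at hi
    rw [faScanA_eq lim_inf lim_sup x lim_inf.length 0 fa (by omega)]
    cases h : faFirst lim_inf lim_sup 0 x with
    | none =>
      simp only []
      have hx : (faFirst lim_inf lim_sup 0 x == some i) = false := by simp [h]
      simp [hx]
    | some m =>
      have hm : m < lim_inf.length := (faFirst_ge lim_inf lim_sup lim_inf.length 0 x m (by omega) h).2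
      have hset : (fa.set m (fa.getD m 0 + 1)).getD i 0
          = if i = m then fa.getD m 0 + 1 else fa.getD i 0 := by
        by_cases him : i = m
        · subst him
          rw [if_pos rfl, List.getD_eq_getElem _ 0 (by simp [hlen]; omega),
              List.getElem_set_self]
        · rw [if_neg him]
          by_cases hilen : i < fa.length
          · rw [List.getD_eq_getElem _ 0 (by simpa using hilen),
                List.getD_eq_getElem fa 0 hilen,
                List.getElem_set_ne (by omega)]
          · omega
      rw [hset]
      by_cases him : i = m
      · subst him
        have hx : (faFirst lim_inf lim_sup 0 x == some i) = true := by simp [h]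
        simp [hx]
        ring
      · rw [if_neg him]
        have hx : (faFirst lim_inf lim_sup 0 x == some i) = false := by
          simp [h]; omega
        simp [hx]

-- clases: A's range-map equals B's pyRange
theorem faClases_eq (k : Nat) :
    (List.range k).map (fun i => ((i + 1 : Nat) : Int)) = PySem.List.pyRange 1 ((k : Int) + 1) 1 := by
  rw [PySem.List.pyRange_one]
  have ht : ((k : Int) + 1 - 1).toNat = k := by omega
  rw [ht]
  apply List.map_congr_left
  intro i _
  push_cast
  ring

-- ===== VERDICT (by name: the statement is the Claim_ definition above) =====
theorem fa_grouped_spec : Claim_equal_fa_grouped := by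
  intro datos lim_inf lim_sup _ _
  unfold Spec_fa_grouped fa_grouped fa_grouped_alt
  simp only [Prod.mk.injEq]
  constructor
  · rw [faFoldA_char lim_inf lim_sup datos _ (by simp),
        faPoolB_char lim_inf lim_sup lim_inf.length 0 datos (by omega)]
    simp only [Nat.sub_zero, Nat.zero_add]
    apply List.map_congr_left
    intro i hi
    simp only [List.mem_range] at hi
    have : (List.replicate lim_inf.length (0 : Int)).getD i 0 = 0 := by
      rw [List.getD_eq_getElem _ 0 (by simpa using hi)]; simp
    rw [this, zero_add]
  · exact faClases_eq lim_inf.length
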